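-- pv_equiv track=rewrite | github.com/Dawanfe/crewai-experiments | src/app/send_doc_to_feishu_chat.py | transform_markdown_for_card
-- ===== SOURCE A (Python) =====
-- from typing import List, Optional
--
-- def transform_markdown_for_card(markdown: str) -> str:
--     lines: List[str] = []
--     prev_blank = False
--     for raw in markdown.splitlines():
--         line = raw.rstrip()
--         stripped = line.lstrip()
--         if not stripped:
--             if not prev_blank:
--                 lines.append("")
--                 prev_blank = True
--             continue
--         prev_blank = False
--         if stripped.startswith('#'):
--             title = stripped.lstrip('#').strip()
--             if title:
--                 lines.append(f"**{title}**")
--             else: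
--                 lines.append("")
--             continue
--         lines.append(line)
--     text = "\n".join(lines)
--     return text
-- ===== SOURCE B (Python) =====
-- from itertools import groupby
--
-- def transform_markdown_for_card(markdown: str) -> str:
--     def tag(raw):
--         line = raw.rstrip()
--         s = line.lstrip()
--         if not s:
--             return ('blank', '')
--         if s.startswith('#'):
--             t = s.lstrip('#').strip()
--             return ('text', f"**{t}**" if t else '')
--         return ('text', line)
--
--     out = []
--     for key, grp in groupby(map(tag, markdown.splitlines()), key=lambda p: p[0]):
--         if key == 'blank':
--             out.append('')
--         else:
--             out.extend(v for _, v in grp)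
--     return '\n'.join(out)
-- ===== Notes on version B (the rewrite author's own statement) =====
-- stated objective: idiomatic
-- what changed: Replaces A's stateful prev_blank-flag loop by a two-phase pipeline: map each line to a (tag, value) token, then itertools.groupby collapses each run of blank tokens to one empty line.
import Mathlib
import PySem

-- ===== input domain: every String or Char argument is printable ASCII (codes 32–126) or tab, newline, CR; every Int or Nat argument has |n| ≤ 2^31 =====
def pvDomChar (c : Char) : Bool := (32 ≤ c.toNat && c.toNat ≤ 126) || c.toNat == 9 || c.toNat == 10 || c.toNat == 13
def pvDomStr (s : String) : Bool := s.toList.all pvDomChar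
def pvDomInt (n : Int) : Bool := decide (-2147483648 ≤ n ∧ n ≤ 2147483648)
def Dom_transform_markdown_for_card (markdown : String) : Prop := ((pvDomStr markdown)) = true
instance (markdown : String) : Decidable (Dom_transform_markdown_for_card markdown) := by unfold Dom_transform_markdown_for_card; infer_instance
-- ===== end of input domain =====

-- B replaces A's prev_blank flag loop by a tag-then-groupby pipeline (one "" per blank run); same values, different decomposition.

-- ===== PORT A =====
-- one loop iteration of A: state = (lines so far, prev_blank)
-- `stripped.lstrip('#')` is ported by hand as dropWhile (· == '#') — exact: lstrip with a
-- one-character set drops exactly the leading occurrences of that character.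
def pvStepA (st : List (List Char) × Bool) (raw : List Char) : List (List Char) × Bool :=
  let line := PySem.Chars.rstrip raw
  let stripped := PySem.Chars.lstrip line
  if stripped = [] then
    if st.2 = false then (st.1 ++ [[]], true) else st
  else
    if PySem.Chars.startswith stripped ['#'] then
      let title := PySem.Chars.strip (stripped.dropWhile (· == '#'))
      if title ≠ [] then (st.1 ++ ['*' :: '*' :: (title ++ ['*', '*'])], false)
      else (st.1 ++ [[]], false)
    else (st.1 ++ [line], false)

def transform_markdown_for_card (markdown : String) : String :=
  let fin := (PySem.Chars.splitlines markdown.toList).foldl pvStepA ([], false)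
  String.ofList (PySem.Chars.join ['\n'] fin.1)

-- ===== PORT B =====
-- tag a raw line: (isBlank, value); lstrip('#') ported by hand as dropWhile (· == '#') (exact, see above)
def pvTag (raw : List Char) : Bool × List Char :=
  let line := PySem.Chars.rstrip raw
  let s := PySem.Chars.lstrip line
  if s = [] then (true, [])
  else if PySem.Chars.startswith s ['#'] then
    let t := PySem.Chars.strip (s.dropWhile (· == '#'))
    (false, if t = [] then [] else '*' :: '*' :: (t ++ ['*', '*']))
  else (false, line)

-- groupby on the blank tag: one "" per maximal run of blanks, text values kept as they come
mutual
def pvCollapse : List (Bool × List Char) → List (List Char)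
  | [] => []
  | (true, _) :: ts => [] :: pvSkipBlanks ts
  | (false, v) :: ts => v :: pvCollapse ts
def pvSkipBlanks : List (Bool × List Char) → List (List Char)
  | [] => []
  | (true, _) :: ts => pvSkipBlanks ts
  | (false, v) :: ts => v :: pvCollapse ts
end

def transform_markdown_for_card_alt (markdown : String) : String :=
  String.ofList (PySem.Chars.join ['\n']
    (pvCollapse ((PySem.Chars.splitlines markdown.toList).map pvTag)))

-- ===== PRECONDITION & SPEC =====
def Spec_transform_markdown_for_card (markdown : String) (out : String) : Prop := out = transform_markdown_for_card_alt markdown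
instance (markdown : String) (out : String) : Decidable (Spec_transform_markdown_for_card markdown out) := by unfold Spec_transform_markdown_for_card; infer_instance

-- ===== CLAIM (what is proved, stated in full; the proofs are below) =====
def Claim_equal_transform_markdown_for_card : Prop := ∀ (markdown : String), Dom_transform_markdown_for_card markdown → Spec_transform_markdown_for_card markdown (transform_markdown_for_card markdown)

-- ===== LEMMAS AND PROOFS =====

-- A's loop, abstracted over the token stream: what A appends given prev_blank
def pvGA (pb : Bool) : List (Bool × List Char) → List (List Char)
  | [] => []
  | (b, v) :: ts =>
    if b then (if pb then pvGA true ts else [] :: pvGA true ts) else v :: pvGA false ts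

theorem pvStepA_eq (st : List (List Char) × Bool) (raw : List Char) :
    pvStepA st raw =
      match pvTag raw with
      | (true, _) => if st.2 then st else (st.1 ++ [[]], true)
      | (false, v) => (st.1 ++ [v], false) := by
  obtain ⟨acc, pb⟩ := st
  unfold pvStepA pvTag
  cases pb <;> simp only [] <;> split_ifs <;> simp_all

theorem pvFoldA (ts : List (List Char)) :
    ∀ (acc : List (List Char)) (pb : Bool),
      (ts.foldl pvStepA (acc, pb)).1 = acc ++ pvGA pb (ts.map pvTag) := by
  induction ts with
  | nil => simp [pvGA]
  | cons raw ts ih =>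
    intro acc pb
    simp only [List.foldl_cons, List.map_cons, pvStepA_eq]
    rcases h : pvTag raw with ⟨b, v⟩
    cases b <;> cases pb <;> simp [pvGA, ih]

theorem pvGA_eq (ts : List (Bool × List Char)) :
    pvGA true ts = pvSkipBlanks ts ∧ pvGA false ts = pvCollapse ts := by
  induction ts with
  | nil => simp [pvGA, pvCollapse, pvSkipBlanks]
  | cons t ts ih =>
    rcases t with ⟨b, v⟩
    cases b <;> simp [pvGA, pvCollapse, pvSkipBlanks, ih.1, ih.2]

theorem pvGA_false (ts : List (Bool × List Char)) : pvGA false ts = pvCollapse ts :=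
  (pvGA_eq ts).2

-- ===== VERDICT (by name: the statement is the Claim_ definition above) =====
theorem transform_markdown_for_card_spec : Claim_equal_transform_markdown_for_card := by
  intro markdown _
  unfold Spec_transform_markdown_for_card transform_markdown_for_card transform_markdown_for_card_alt
  simp only [pvFoldA, pvGA_false, List.nil_append]
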